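-- pv_equiv track=rewrite | github.com/2010-07-23-multi-source-remake/multi-source-remake | app/multi_source_remake.py | suggest_correct
-- ===== SOURCE A (Python) =====
-- def suggest_correct(bufs, rating):
--     sorted_rating = sorted(
--         [(i, score) for i, score in enumerate(rating)],
--         key=lambda x: x[1],
--         reverse=True
--     )
--
--     suggest = None
--     sugg_score = None
--
--     for candidate, cand_rating_score in sorted_rating:
--         cand_buf = bufs[candidate]
--         cand_score = len([1 for buf in bufs if cand_buf == buf])
--
--         if suggest is None or cand_score > sugg_score:
--             suggest = candidate
--             sugg_score = cand_score
--
--     return suggest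
-- ===== SOURCE B (Python) =====
-- def suggest_correct(bufs, rating):
--     counts = {}
--     for b in bufs:
--         counts[b] = counts.get(b, 0) + 1
--     best_key = None
--     best_i = None
--     for i in range(len(rating)):
--         key = (counts[bufs[i]], rating[i], -i)
--         if best_key is None or key > best_key:
--             best_key = key
--             best_i = i
--     return best_i
-- ===== Notes on version B (the rewrite author's own statement) =====
-- stated objective: faster
-- what changed: B drops A's sort entirely: it builds a duplicate-count dict in one pass over bufs and then takes a single-pass argmax over indices with the composite key (count, rating[i], -i), which reproduces A's tie-break (highest rating, then lowest index) without sorting and without re-scanning bufs per candidate.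
import Mathlib
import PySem

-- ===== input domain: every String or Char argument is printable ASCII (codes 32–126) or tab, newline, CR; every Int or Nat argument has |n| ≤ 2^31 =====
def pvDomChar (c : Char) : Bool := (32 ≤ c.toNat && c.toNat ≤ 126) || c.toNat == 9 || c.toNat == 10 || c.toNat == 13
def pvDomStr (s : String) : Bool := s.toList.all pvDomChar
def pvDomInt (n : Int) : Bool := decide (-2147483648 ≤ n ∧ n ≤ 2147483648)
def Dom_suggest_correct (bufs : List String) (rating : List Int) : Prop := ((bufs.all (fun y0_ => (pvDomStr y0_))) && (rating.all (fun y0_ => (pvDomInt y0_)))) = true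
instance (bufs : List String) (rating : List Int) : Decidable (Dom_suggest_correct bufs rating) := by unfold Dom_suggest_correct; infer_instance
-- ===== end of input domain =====

-- B replaces A's sort-then-scan by one counting dict over bufs plus a single argmax pass with key (count, rating[i], -i); return values proved equal on Pre_.

-- ===== PORT A =====
-- loop body of A's 'for candidate, cand_rating_score in sorted_rating' (state = (suggest, sugg_score), none = both None)
def aStep (bufs : List String) (st : Option (Int × Int)) (cand : Int × Int) : Option (Int × Int) :=
  let cand_buf := PySem.List.pyGetD bufs cand.1 ""   -- bufs[candidate]; in range under Pre_
  let cand_score : Int := ((bufs.filter (fun buf => cand_buf == buf)).length : Int)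
  match st with
  | none => some (cand.1, cand_score)
  | some (suggest, sugg_score) =>
    if sugg_score < cand_score then some (cand.1, cand_score) else some (suggest, sugg_score)

def suggest_correct (bufs : List String) (rating : List Int) : Option Int :=
  let sorted_rating := PySem.List.sorted (PySem.List.enumerate rating 0) (fun x => x.2) true
  (sorted_rating.foldl (aStep bufs) none).map (fun p => p.1)

-- ===== PORT B =====
-- Python tuple '>' on int 3-tuples, written out lexicographically (exact on int triples)
def pyLexGt (a b : Int × Int × Int) : Bool :=
  decide (b.1 < a.1) || (a.1 == b.1 && (decide (b.2.1 < a.2.1) || (a.2.1 == b.2.1 && decide (b.2.2 < a.2.2))))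

-- counts[b] = counts.get(b, 0) + 1 loop
def bCounts (bufs : List String) : PySem.Dict String Int :=
  bufs.foldl (fun d b => d.insert b (d.getD b 0 + 1)) PySem.Dict.empty

-- loop body of B's 'for i in range(len(rating))' (state = (best_key, best_i), none = both None);
-- counts[bufs[i]]: under Pre_ the index is in range and the key present, so getD is exact
def bStep (bufs : List String) (rating : List Int) (counts : PySem.Dict String Int)
    (st : Option ((Int × Int × Int) × Int)) (i : Int) : Option ((Int × Int × Int) × Int) :=
  let key : Int × Int × Int := (counts.getD (PySem.List.pyGetD bufs i "") 0, PySem.List.pyGetD rating i 0, -i)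
  match st with
  | none => some (key, i)
  | some bkbi => if pyLexGt key bkbi.1 then some (key, i) else some bkbi

def suggest_correct_alt (bufs : List String) (rating : List Int) : Option Int :=
  let counts := bCounts bufs
  (((PySem.List.pyRange 0 (rating.length : Int) 1).foldl (bStep bufs rating counts) none).map (fun p => p.2))

-- ===== PRECONDITION & SPEC =====
-- Pre_: A evaluates bufs[i] for every index i of rating, so it raises IndexError whenever rating is longer than bufs (B raises there too); exactly those inputs are excluded.
def Pre_suggest_correct (bufs : List String) (rating : List Int) : Prop := rating.length ≤ bufs.length
instance (bufs : List String) (rating : List Int) : Decidable (Pre_suggest_correct bufs rating) := by unfold Pre_suggest_correct; infer_instance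
def pvWitness_suggest_correct : List String × List Int := (["a", "b", "a"], [1, 2, 3])

def Spec_suggest_correct (bufs : List String) (rating : List Int) (out : Option Int) : Prop := out = suggest_correct_alt bufs rating
instance (bufs : List String) (rating : List Int) (out : Option Int) : Decidable (Spec_suggest_correct bufs rating out) := by unfold Spec_suggest_correct; infer_instance

-- ===== CLAIM (what is proved, stated in full; the proofs are below) =====
def Claim_equal_suggest_correct : Prop := ∀ (bufs : List String) (rating : List Int), Dom_suggest_correct bufs rating → Pre_suggest_correct bufs rating → Spec_suggest_correct bufs rating (suggest_correct bufs rating)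

-- ===== LEMMAS AND PROOFS =====

-- the count A computes for the candidate pair p
def cOf (bufs : List String) (p : Int × Int) : Int :=
  ((bufs.filter (fun buf => (PySem.List.pyGetD bufs p.1 "") == buf)).length : Int)

-- the composite key both programs effectively maximise
def kOf (bufs : List String) (rating : List Int) (i : Int) : Int × Int × Int :=
  (((bufs.filter (fun buf => (PySem.List.pyGetD bufs i "") == buf)).length : Int),
   PySem.List.pyGetD rating i 0, -i)

-- the (strict) order in which A's stable reverse sort emits the enumerate pairs
def stR (p q : Int × Int) : Prop := q.2 < p.2 ∨ (p.2 = q.2 ∧ p.1 < q.1)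

theorem lexGt_iff (a b : Int × Int × Int) :
    pyLexGt a b = true ↔
      (b.1 < a.1 ∨ (a.1 = b.1 ∧ (b.2.1 < a.2.1 ∨ (a.2.1 = b.2.1 ∧ b.2.2 < a.2.2)))) := by
  simp [pyLexGt]

theorem lexGt_trans {a b c : Int × Int × Int}
    (h1 : pyLexGt a b = true) (h2 : pyLexGt b c = true) : pyLexGt a c = true := by
  rw [lexGt_iff] at *; omega

theorem lexGt_total_third {a b : Int × Int × Int} (h3 : a.2.2 ≠ b.2.2)
    (h : ¬ pyLexGt a b = true) : pyLexGt b a = true := by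
  rw [lexGt_iff] at *
  rcases a with ⟨a1,a2,a3⟩; rcases b with ⟨b1,b2,b3⟩
  simp at *; omega

theorem lexGt_asymm {a b : Int × Int × Int}
    (h1 : pyLexGt a b = true) (h2 : pyLexGt b a = true) : False := by
  rw [lexGt_iff] at *; omega

theorem insertBy_pairwise_stable (x : Int × Int) (ys : List (Int × Int))
    (hys : ys.Pairwise stR) (hidx : ∀ y ∈ ys, y.1 < x.1) :
    (PySem.List.insertBy (fun a b : Int × Int => decide (b.2 < a.2)) x ys).Pairwise stR := by
  induction ys with
  | nil => simp [PySem.List.insertBy]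
  | cons y ys ih =>
    rw [List.pairwise_cons] at hys
    obtain ⟨hy, hys⟩ := hys
    by_cases h : y.2 < x.2
    · rw [show PySem.List.insertBy (fun a b : Int × Int => decide (b.2 < a.2)) x (y :: ys) = x :: y :: ys by
        simp [PySem.List.insertBy, h]]
      refine List.Pairwise.cons ?_ (List.Pairwise.cons hy hys)
      intro z hz
      rcases hz with _ | hz
      · exact Or.inl h
      · rcases hy z (by assumption) with h2 | ⟨h2, _⟩
        · exact Or.inl (lt_trans h2 h)
        · exact Or.inl (h2 ▸ h)
    · rw [show PySem.List.insertBy (fun a b : Int × Int => decide (b.2 < a.2)) x (y :: ys) =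
          y :: PySem.List.insertBy (fun a b : Int × Int => decide (b.2 < a.2)) x ys by
        simp [PySem.List.insertBy, h]]
      refine List.Pairwise.cons ?_ (ih hys (fun z hz => hidx z (List.mem_cons_of_mem _ hz)))
      intro z hz
      rw [PySem.List.mem_insertBy] at hz
      rcases hz with rfl | hz
      · -- z = x : need stR y x
        rcases lt_or_eq_of_le (not_lt.mp h) with h2 | h2
        · exact Or.inl h2
        · exact Or.inr ⟨h2.symm, hidx y (List.mem_cons_self)⟩
      · exact hy z hz

theorem foldl_insertBy_enum (l : List Int) : ∀ (s : Int) (acc : List (Int × Int)),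
    acc.Pairwise stR → (∀ y ∈ acc, y.1 < s) →
    (List.foldl (fun a x => PySem.List.insertBy (fun a b : Int × Int => decide (b.2 < a.2)) x a)
        acc (PySem.List.enumerate l s)).Pairwise stR := by
  induction l with
  | nil => intro s acc h _; simpa [PySem.List.enumerate_nil]
  | cons r l ih =>
    intro s acc hacc hidx
    rw [PySem.List.enumerate_cons, List.foldl_cons]
    apply ih (s + 1)
    · exact insertBy_pairwise_stable _ _ hacc (by intro y hy; exact hidx y hy)
    · intro y hy
      rw [PySem.List.mem_insertBy] at hy
      rcases hy with rfl | hy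
      · omega
      · have := hidx y hy; omega

theorem sorted_pairwise_stR (rating : List Int) :
    (PySem.List.sorted (PySem.List.enumerate rating 0) (fun x => x.2) true).Pairwise stR := by
  rw [PySem.List.sorted_rev_eq_foldl_insertBy]
  exact foldl_insertBy_enum rating 0 [] List.Pairwise.nil (by simp)

theorem enum_pair (rating : List Int) (p : Int × Int)
    (hp : p ∈ PySem.List.enumerate rating 0) :
    ∃ k : Nat, k < rating.length ∧ p.1 = (k : Int) ∧ p.2 = PySem.List.pyGetD rating p.1 0 := by
  rw [PySem.List.mem_enumerate_iff] at hp
  obtain ⟨k, hk, rfl⟩ := hp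
  refine ⟨k, hk, by simp, ?_⟩
  simp [PySem.List.pyGetD_natCast, List.getD_eq_getElem?_getD, hk]

theorem foldA_some (bufs : List String) (L : List (Int × Int)) :
    ∀ (i0 c0 : Int), ∃ i c, List.foldl (aStep bufs) (some (i0, c0)) L = some (i, c) ∧
      ((i = i0 ∧ c = c0 ∧ ∀ p ∈ L, cOf bufs p ≤ c0) ∨
       (∃ L1 p L2, L = L1 ++ p :: L2 ∧ i = p.1 ∧ c = cOf bufs p ∧ c0 < c ∧
          (∀ q ∈ L1, cOf bufs q < c) ∧ (∀ q ∈ L2, cOf bufs q ≤ c))) := by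
  induction L with
  | nil => intro i0 c0; exact ⟨i0, c0, rfl, Or.inl ⟨rfl, rfl, by simp⟩⟩
  | cons a L ih =>
    intro i0 c0
    rw [List.foldl_cons]
    by_cases h : c0 < cOf bufs a
    · have h' := h; simp only [cOf] at h'
      rw [show aStep bufs (some (i0, c0)) a = some (a.1, cOf bufs a) by
        simp [aStep, cOf, h']]
      obtain ⟨i, c, heq, hcase⟩ := ih a.1 (cOf bufs a)
      refine ⟨i, c, heq, Or.inr ?_⟩
      rcases hcase with ⟨rfl, rfl, hall⟩ | ⟨L1, p, L2, rfl, hi, hc, hlt, hL1, hL2⟩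
      · exact ⟨[], a, L, rfl, rfl, rfl, h, by simp, hall⟩
      · refine ⟨a :: L1, p, L2, rfl, hi, hc, lt_trans h hlt, ?_, hL2⟩
        intro q hq
        rcases List.mem_cons.mp hq with rfl | hq
        · exact hlt
        · exact hL1 q hq
    · have h' := h; simp only [cOf] at h'
      rw [show aStep bufs (some (i0, c0)) a = some (i0, c0) by
        simp [aStep, h']]
      obtain ⟨i, c, heq, hcase⟩ := ih i0 c0
      refine ⟨i, c, heq, ?_⟩
      rcases hcase with ⟨hi, hc, hall⟩ | ⟨L1, p, L2, rfl, hi, hc, hlt, hL1, hL2⟩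
      · refine Or.inl ⟨hi, hc, ?_⟩
        intro q hq
        rcases List.mem_cons.mp hq with rfl | hq
        · omega
        · exact hall q hq
      · refine Or.inr ⟨a :: L1, p, L2, rfl, hi, hc, hlt, ?_, hL2⟩
        intro q hq
        rcases List.mem_cons.mp hq with rfl | hq
        · omega
        · exact hL1 q hq

theorem win_lemma (bufs : List String) (rating : List Int) (pw q : Int × Int) (m j : Nat)
    (hpw : pw ∈ PySem.List.enumerate rating 0) (hq : q ∈ PySem.List.enumerate rating 0)
    (hpm : pw.1 = (m : Int)) (hqj : q.1 = (j : Int))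
    (hcase : cOf bufs q < cOf bufs pw ∨ (cOf bufs q ≤ cOf bufs pw ∧ stR pw q)) :
    pyLexGt (kOf bufs rating (m : Int)) (kOf bufs rating (j : Int)) = true := by
  obtain ⟨k1, hk1, e1, e2⟩ := enum_pair rating pw hpw
  obtain ⟨k2, hk2, f1, f2⟩ := enum_pair rating q hq
  have hA : kOf bufs rating pw.1 = (cOf bufs pw, pw.2, -pw.1) := by rw [kOf, ← e2]; rfl
  have hB : kOf bufs rating q.1 = (cOf bufs q, q.2, -q.1) := by rw [kOf, ← f2]; rfl
  rw [← hpm, ← hqj, hA, hB, lexGt_iff]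
  dsimp only
  rw [stR] at hcase
  omega

theorem A_argmax (bufs : List String) (rating : List Int) (h : rating ≠ []) :
    ∃ m : Nat, m < rating.length ∧ suggest_correct bufs rating = some (m : Int) ∧
      ∀ j : Nat, j < rating.length → j ≠ m →
        pyLexGt (kOf bufs rating (m : Int)) (kOf bufs rating (j : Int)) = true := by
  set S := PySem.List.sorted (PySem.List.enumerate rating 0) (fun x => x.2) true with hSdef
  have hSne : S ≠ [] := by
    rw [hSdef, Ne, PySem.List.sorted_eq_nil_iff]
    rcases rating with _ | ⟨r, rs⟩
    · exact absurd rfl h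
    · rw [PySem.List.enumerate_cons]; simp
  obtain ⟨p0, S', hS⟩ := List.exists_cons_of_ne_nil hSne
  have hpair : S.Pairwise stR := sorted_pairwise_stR rating
  have hmemS : ∀ q ∈ S, q ∈ PySem.List.enumerate rating 0 := by
    intro q hq; rwa [hSdef, PySem.List.mem_sorted] at hq
  have hqmem : ∀ j : Nat, j < rating.length →
      (((j : Int), rating.getD j 0) ∈ PySem.List.enumerate rating 0) := by
    intro j hj
    rw [PySem.List.mem_enumerate_iff]
    exact ⟨j, hj, by simp [List.getD_eq_getElem?_getD, hj]⟩
  obtain ⟨i, c, heq, hcase⟩ := foldA_some bufs S' p0.1 (cOf bufs p0)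
  have hres : suggest_correct bufs rating = some i := by
    rw [suggest_correct]
    simp only [← hSdef]
    rw [hS, List.foldl_cons]
    rw [show aStep bufs none p0 = some (p0.1, cOf bufs p0) from rfl, heq]
    rfl
  have hp0S : p0 ∈ S := hS ▸ List.mem_cons_self
  rcases hcase with ⟨hi, _, hall⟩ | ⟨L1, p, L2, hS', hi, hc, hc0, hL1, hL2⟩
  · -- winner is the head p0
    obtain ⟨m, hm, hm1, _⟩ := enum_pair rating p0 (hmemS p0 hp0S)
    refine ⟨m, hm, by rw [hres, hi, hm1], ?_⟩
    intro j hj hjm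
    set q : Int × Int := ((j : Int), rating.getD j 0) with hqdef
    have hqS : q ∈ S := by rw [hSdef, PySem.List.mem_sorted]; exact hqmem j hj
    rcases List.mem_cons.mp (hS ▸ hqS) with hq0 | hqS'
    · exfalso; apply hjm
      have hq1 : q.1 = p0.1 := by rw [hq0]
      rw [hm1] at hq1
      have : ((j : Int)) = ((m : Int)) := hq1
      exact_mod_cast this
    · refine win_lemma bufs rating p0 q m j (hmemS p0 hp0S) (hqmem j hj) hm1 rfl
        (Or.inr ⟨hall q hqS', (List.pairwise_cons.mp (hS ▸ hpair)).1 q hqS'⟩)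
  · -- winner is p, inside S' = L1 ++ p :: L2
    have hpS : p ∈ S := by rw [hS, hS']; simp
    obtain ⟨m, hm, hm1, _⟩ := enum_pair rating p (hmemS p hpS)
    refine ⟨m, hm, by rw [hres, hi, hm1], ?_⟩
    intro j hj hjm
    set q : Int × Int := ((j : Int), rating.getD j 0) with hqdef
    have hqS : q ∈ S := by rw [hSdef, PySem.List.mem_sorted]; exact hqmem j hj
    have hSshape : S = (p0 :: L1) ++ p :: L2 := by rw [hS, hS']; rfl
    have hpairApp := hSshape ▸ hpair
    rw [List.pairwise_append] at hpairApp
    obtain ⟨hpairL, hpairR, _⟩ := hpairApp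
    have hstpq : ∀ x ∈ L2, stR p x := (List.pairwise_cons.mp hpairR).1
    rcases List.mem_append.mp (hSshape ▸ hqS) with hqL | hqR
    · -- q in p0 :: L1 : strictly smaller count
      have hqlt : cOf bufs q < cOf bufs p := by
        rcases List.mem_cons.mp hqL with rfl | hq1
        · rw [← hc]; exact hc0
        · rw [← hc]; exact hL1 q hq1
      exact win_lemma bufs rating p q m j (hmemS p hpS) (hqmem j hj) hm1 rfl (Or.inl hqlt)
    · rcases List.mem_cons.mp hqR with hqp | hqL2
      · exfalso; apply hjm
        have hq1 : q.1 = p.1 := by rw [hqp]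
        rw [hm1] at hq1
        have : ((j : Int)) = ((m : Int)) := hq1
        exact_mod_cast this
      · refine win_lemma bufs rating p q m j (hmemS p hpS) (hqmem j hj) hm1 rfl
          (Or.inr ⟨hc ▸ hL2 q hqL2, hstpq q hqL2⟩)

theorem getD_countFold (l : List String) :
    ∀ (d : PySem.Dict String Int) (s : String),
      (l.foldl (fun d b => d.insert b (d.getD b 0 + 1)) d).getD s 0 = d.getD s 0 + (l.count s : Int) := by
  induction l with
  | nil => intro d s; simp
  | cons b l ih =>
    intro d s
    rw [List.foldl_cons, ih, PySem.Dict.getD_insert, List.count_cons]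
    by_cases h : s = b
    · subst h; simp; ring
    · simp [h, List.count]
      exact fun hh => h hh.symm

theorem count_filter_bridge (bufs : List String) (s : String) :
    ((bufs.filter (fun buf => s == buf)).length : Int) = (bufs.count s : Int) := by
  congr 1
  have hlf : ∀ (l : List String) (p : String → Bool), (l.filter p).length = l.countP p := by
    intro l p
    induction l with
    | nil => simp
    | cons a t iht => by_cases hp : p a <;> simp [List.filter, hp, iht]
  rw [hlf, List.count]
  exact List.countP_congr (by intro x _; constructor <;> (intro h; simp at h; simp [h]))

theorem bCounts_getD (bufs : List String) (s : String) :
    (bCounts bufs).getD s 0 = ((bufs.filter (fun buf => s == buf)).length : Int) := by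
  rw [bCounts, getD_countFold, PySem.Dict.getD_empty, count_filter_bridge]; ring

theorem bStep_eq_kStep (bufs : List String) (rating : List Int)
    (st : Option ((Int × Int × Int) × Int)) (i : Int) :
    bStep bufs rating (bCounts bufs) st i =
      (match st with
       | none => some (kOf bufs rating i, i)
       | some bkbi => if pyLexGt (kOf bufs rating i) bkbi.1 then some (kOf bufs rating i, i) else some bkbi) := by
  have hk : ((bCounts bufs).getD (PySem.List.pyGetD bufs i "") 0, PySem.List.pyGetD rating i 0, -i)
      = kOf bufs rating i := by
    rw [bCounts_getD]; rfl
  cases st <;> simp [bStep, hk]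

theorem foldB_spec (bufs : List String) (rating : List Int) :
    ∀ n : Nat, 0 < n → ∃ i : Nat, i < n ∧
      List.foldl (bStep bufs rating (bCounts bufs)) none (PySem.List.pyRange 0 (n : Int) 1) =
        some (kOf bufs rating (i : Int), (i : Int)) ∧
      ∀ j : Nat, j < n → j ≠ i →
        pyLexGt (kOf bufs rating (i : Int)) (kOf bufs rating (j : Int)) = true := by
  intro n
  induction n with
  | zero => intro h; omega
  | succ n ih =>
    intro _
    have hsplit : PySem.List.pyRange 0 ((n + 1 : Nat) : Int) 1
        = PySem.List.pyRange 0 (n : Int) 1 ++ [(n : Int)] := by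
      rw [PySem.List.pyRange_one_append 0 (n : Int) ((n+1 : Nat) : Int) (by omega) (by omega)]
      congr 1
      rw [PySem.List.pyRange_one_cons (by omega)]
      norm_num
    rw [hsplit, List.foldl_append]
    by_cases hn : 0 < n
    · obtain ⟨i, hi, heq, hprop⟩ := ih hn
      rw [heq, List.foldl_cons, List.foldl_nil, bStep_eq_kStep]
      dsimp only
      by_cases hgt : pyLexGt (kOf bufs rating (n : Int)) (kOf bufs rating (i : Int)) = true
      · simp only [hgt, if_pos]
        refine ⟨n, by omega, by simp, ?_⟩
        intro j hj hji
        by_cases hjieq : j = i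
        · subst hjieq; exact hgt
        · exact lexGt_trans hgt (hprop j (by omega) hjieq)
      · rw [if_neg hgt]
        refine ⟨i, by omega, rfl, ?_⟩
        intro j hj hji
        by_cases hjn : j = n
        · subst hjn
          refine lexGt_total_third (by simp only [kOf]; simp; omega) hgt
        · exact hprop j (by omega) hji
    · have hn0 : n = 0 := by omega
      subst hn0
      refine ⟨0, by omega, ?_, by intro j hj hji; omega⟩
      simp only [Nat.cast_zero]
      rw [show PySem.List.pyRange 0 (0:Int) 1 = [] from rfl, List.foldl_nil, List.foldl_cons,
        List.foldl_nil, bStep_eq_kStep]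

-- ===== VERDICT (by name: the statement is the Claim_ definition above) =====
theorem suggest_correct_spec : Claim_equal_suggest_correct := by
  intro bufs rating _ _
  rw [Spec_suggest_correct]
  by_cases h : rating = []
  · subst h; rfl
  · obtain ⟨m, hm, hres, hpropA⟩ := A_argmax bufs rating h
    have hn : 0 < rating.length := by
      rcases rating with _ | _
      · exact absurd rfl h
      · simp
    obtain ⟨i, hi, heqB, hpropB⟩ := foldB_spec bufs rating rating.length hn
    have haltres : suggest_correct_alt bufs rating = some (i : Int) := by
      rw [suggest_correct_alt]
      simp only [bCounts]
      rw [show bufs.foldl (fun d b => d.insert b (d.getD b 0 + 1)) PySem.Dict.empty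
            = bCounts bufs from rfl, heqB]
      rfl
    have hmi : m = i := by
      by_contra hne
      exact lexGt_asymm (hpropA i hi (fun he => hne he.symm)) (hpropB m hm (fun he => hne he))
    rw [hres, haltres, hmi]
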